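-- pv_equiv track=rewrite | github.com/JerryAgbesi/ds-algorithms | leetcode/get_min_operations.py | citadelGetMinOperations
-- ===== SOURCE A (Python) =====
-- from typing import List
--
-- def citadelGetMinOperations(executionTime: List[int], x: int, y: int) -> int:
--
--       executionTime.sort()
--
--       operations = 0
--
--       while executionTime:
--         executionTime[-1] -= x
--         for i in range(len(executionTime) - 1):
--             executionTime[i] -= y
--
--
--
--         for i in range(len(executionTime)-1,-1,-1):
--             if executionTime[i] < 1:
--                 del executionTime[i]
--
--         operations += 1
--
--       return operations
-- ===== SOURCE B (Python) =====
-- def citadelGetMinOperations(executionTime, x, y):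
--     # Bulk simulation: sort once, walk the values from largest to smallest and
--     # count in closed form how many operations each element takes while it is
--     # the last (largest) one.  Does not mutate the input list.
--     ops = 0
--     for t in sorted(executionTime, reverse=True):
--         # While waiting, the element's value after j ops is t - y*j, which is
--         # monotone in j, so it dropped below 1 at some point iff an endpoint did.
--         if ops and min(t - y, t - y * ops) < 1:
--             continue  # already removed by the y-decrements before its turn
--         v = t - y * ops  # its value when it becomes the last element
--         ops += max(1, (v - 1) // x + 1)  # ceil division; at least one op each
--     return ops
-- ===== Notes on version B (the rewrite author's own statement) =====
-- stated objective: faster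
-- what changed: Instead of simulating every operation on the whole list (each op decrements all elements and re-scans for deletions), B sorts once and does a single descending pass computing in closed form (one ceiling division per element) how many operations each element takes as the last one, skipping elements that the y-decrements already removed; Pre_ excludes x <= 0, where A's while-loop can run forever.
-- outside the precondition, e.g. on citadelGetMinOperations([-28, -1], 0, 62): A returns 1, B raises ZeroDivisionError; on citadelGetMinOperations([5], 0, 1): A does not finish within the time limit, B raises ZeroDivisionError
import Mathlib
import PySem

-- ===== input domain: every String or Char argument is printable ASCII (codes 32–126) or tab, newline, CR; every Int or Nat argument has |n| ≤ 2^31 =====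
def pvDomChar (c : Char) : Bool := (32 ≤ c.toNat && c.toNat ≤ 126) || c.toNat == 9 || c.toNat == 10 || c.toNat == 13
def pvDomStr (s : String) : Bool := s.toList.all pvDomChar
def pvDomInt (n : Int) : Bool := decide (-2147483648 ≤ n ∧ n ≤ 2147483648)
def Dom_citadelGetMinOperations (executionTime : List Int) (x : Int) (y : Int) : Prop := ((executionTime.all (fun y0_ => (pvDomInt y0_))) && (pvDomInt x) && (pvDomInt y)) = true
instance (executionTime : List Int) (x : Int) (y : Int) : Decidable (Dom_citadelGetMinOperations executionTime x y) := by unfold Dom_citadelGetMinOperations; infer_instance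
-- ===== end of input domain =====

-- B replaces A's per-operation simulation by one sorted descending pass with a
-- closed-form operation count per element (objective: faster, asymptotically).
-- Note: A sorts `executionTime` in place; the equivalence proved here is about the
-- RETURN value only (B does not mutate its argument).

-- ===== PORT A =====
-- one iteration of A's while-body: last -= x, every other element -= y,
-- then delete (right to left) every element < 1
def pvStepA (x y : Int) (l : List Int) : List Int :=
  ((l.dropLast.map (fun t => t - y)) ++ [l.getLast?.getD 0 - x]).filter (fun t => decide (1 ≤ t))

-- A's while-loop; the fuel is only a termination guard (Pre_ guarantees it is never exhausted)
def pvLoopA (x y : Int) : Nat → List Int → Int → Int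
  | 0, _, ops => ops
  | f + 1, l, ops => if l.isEmpty then ops else pvLoopA x y f (pvStepA x y l) (ops + 1)

-- fuel bound: enough operations to exhaust the list when 1 ≤ x (proved below)
def pvFuelStep (y : Int) (p : Nat) (t : Int) : Nat := p + 1 + (t + (y.natAbs : Int) * (p : Int)).toNat

def citadelGetMinOperations (executionTime : List Int) (x : Int) (y : Int) : Int :=
  let s := PySem.List.sorted executionTime (fun t => t) false
  pvLoopA x y (s.reverse.foldl (pvFuelStep y) 0) s 0

-- ===== PORT B =====
-- "ops and min(t - y, t - y * ops) < 1"
def pvDead (y T t : Int) : Bool := decide (T ≠ 0) && decide (min (t - y) (t - y * T) < 1)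

-- "max(1, (v - 1) // x + 1)"
def pvSteps (x v : Int) : Int := max 1 (PySem.Int.floordiv (v - 1) x + 1)

def pvGo (x y : Int) : List Int → Int → Int
  | [], T => T
  | t :: r, T =>
    if pvDead y T t then pvGo x y r T
    else pvGo x y r (T + pvSteps x (t - y * T))

def citadelGetMinOperations_alt (executionTime : List Int) (x : Int) (y : Int) : Int :=
  pvGo x y ((PySem.List.sorted executionTime (fun t => t) false).reverse) 0

-- ===== PRECONDITION & SPEC =====
-- Pre_ excludes x ≤ 0, where A's while-loop does not terminate whenever some element
-- never drops below 1 (e.g. [5], x=0, y=1); for x ≥ 1 A always returns.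
def Pre_citadelGetMinOperations (executionTime : List Int) (x : Int) (y : Int) : Prop := 1 ≤ x
instance (executionTime : List Int) (x : Int) (y : Int) : Decidable (Pre_citadelGetMinOperations executionTime x y) := by unfold Pre_citadelGetMinOperations; infer_instance
def pvWitness_citadelGetMinOperations : List Int × Int × Int := ([3, 1, 2], 2, 1)

def Spec_citadelGetMinOperations (executionTime : List Int) (x : Int) (y : Int) (out : Int) : Prop := out = citadelGetMinOperations_alt executionTime x y
instance (executionTime : List Int) (x : Int) (y : Int) (out : Int) : Decidable (Spec_citadelGetMinOperations executionTime x y out) := by unfold Spec_citadelGetMinOperations; infer_instance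

-- ===== CLAIM (what is proved, stated in full; the proofs are below) =====
def Claim_equal_citadelGetMinOperations : Prop := ∀ (executionTime : List Int) (x : Int) (y : Int), Dom_citadelGetMinOperations executionTime x y → Pre_citadelGetMinOperations executionTime x y → Spec_citadelGetMinOperations executionTime x y (citadelGetMinOperations executionTime x y)


-- ===== LEMMAS AND PROOFS =====

-- proof-side view of A's evolving list: the elements of `l` that survived the first
-- T operations as non-last elements, each decreased by y*T
def pvAlive (y T t : Int) : Bool := decide (∀ j ∈ List.range T.toNat, 1 ≤ t - y * ((j : Int) + 1))
def pvF (y T : Int) (l : List Int) : List Int :=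
  (l.filter (fun t => pvAlive y T t)).map (fun t => t - y * T)

theorem pvLoopA_nil (x y : Int) (f : Nat) (ops : Int) : pvLoopA x y f [] ops = ops := by
  cases f <;> simp [pvLoopA]

theorem pvF_append (y T : Int) (a b : List Int) : pvF y T (a ++ b) = pvF y T a ++ pvF y T b := by
  simp [pvF]

theorem pvF_zero (y : Int) (l : List Int) : pvF y 0 l = l := by
  simp [pvF, pvAlive]

theorem pvF_singleton (y T t : Int) :
    pvF y T [t] = if pvAlive y T t then [t - y * T] else [] := by
  by_cases h : pvAlive y T t <;> simp [pvF, h]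

-- B's endpoint death test is the negation of the ∀-form survival test (for 0 ≤ T)
theorem pvAlive_not_dead (y T t : Int) (hT : 0 ≤ T) : pvAlive y T t = !pvDead y T t := by
  have hiff : (∀ j ∈ List.range T.toNat, 1 ≤ t - y * ((j : Int) + 1)) ↔
      ¬(T ≠ 0 ∧ min (t - y) (t - y * T) < 1) := by
    constructor
    · intro hall hcon
      obtain ⟨hT1, hlt⟩ := hcon
      rcases min_lt_iff.mp hlt with h | h
      · have hmem : 0 ∈ List.range T.toNat := by rw [List.mem_range]; omega
        have h1 := hall _ hmem
        simp only [Nat.cast_zero, zero_add] at h1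
        omega
      · have hmem : T.toNat - 1 ∈ List.range T.toNat := by
          rw [List.mem_range]; omega
        have h1 := hall _ hmem
        have hc : ((T.toNat - 1 : Nat) : Int) + 1 = T := by omega
        rw [hc] at h1
        omega
    · intro hn j hj
      rw [List.mem_range] at hj
      by_contra hlt'
      apply hn
      refine ⟨by omega, min_lt_iff.mpr ?_⟩
      rcases le_or_gt 0 y with hy | hy
      · right
        have h1 : (j : Int) + 1 ≤ T := by omega
        have h2 : y * ((j : Int) + 1) ≤ y * T := mul_le_mul_of_nonneg_left h1 hy
        omega
      · left
        have h1 : (1 : Int) ≤ (j : Int) + 1 := by omega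
        have h2 : y * ((j : Int) + 1) ≤ y * 1 := mul_le_mul_of_nonpos_left h1 (by omega)
        omega
  simp only [pvAlive, pvDead, ← Bool.decide_and, ← decide_not, decide_eq_decide]
  exact hiff

theorem pvAlive_succ (y T t : Int) (hT : 0 ≤ T) :
    pvAlive y (T + 1) t = (pvAlive y T t && decide (1 ≤ t - y * (T + 1))) := by
  have h1 : (T + 1).toNat = T.toNat + 1 := by omega
  have hc : ((T.toNat : Int)) + 1 = T + 1 := by omega
  simp only [pvAlive, ← Bool.decide_and, decide_eq_decide, h1, List.range_succ, List.mem_append,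
    List.mem_singleton]
  constructor
  · intro h
    refine ⟨fun j hj => h j (Or.inl hj), ?_⟩
    have := h T.toNat (Or.inr rfl)
    rwa [hc] at this
  · rintro ⟨h, hl⟩ j hj
    rcases hj with hj | rfl
    · exact h j hj
    · rwa [hc]

-- one loop step taken on the pvF-view: the last element loses x, the survivors advance to T+1
theorem pvStepA_F (x y : Int) (T : Int) (front : List Int) (w : Int) (hT : 0 ≤ T) :
    pvStepA x y (pvF y T front ++ [w]) =
      pvF y (T + 1) front ++ (if 1 ≤ w - x then [w - x] else []) := by
  unfold pvStepA
  rw [List.dropLast_concat, List.getLast?_concat]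
  simp only [Option.getD_some, List.filter_append]
  congr 1
  · simp only [pvF, List.map_map, List.filter_map, List.filter_filter]
    have hmap : ∀ t : Int, ((fun t => t - y) ∘ fun t => t - y * T) t = t - y * (T + 1) := by
      intro t; simp [Function.comp]; ring
    rw [List.map_congr_left (fun t _ => hmap t)]
    congr 1
    apply List.filter_congr
    intro t _
    rw [pvAlive_succ y T t hT]
    simp only [Function.comp]
    have harith : t - y * T - y = t - y * (T + 1) := by ring
    simp only [harith, Bool.and_comm]
  · by_cases h : 1 ≤ w - x <;> simp [h]

-- the k operations during which w is the last element, taken in one jump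
theorem pvPhase (x y : Int) : ∀ (k : Nat) (f : Nat) (front : List Int) (T ops w : Int),
    0 ≤ T → 1 ≤ k →
    (∀ j : Nat, 1 ≤ j → j < k → 1 ≤ w - x * j) →
    w - x * k < 1 →
    pvLoopA x y (f + k) (pvF y T front ++ [w]) ops
      = pvLoopA x y f (pvF y (T + k) front) (ops + k) := by
  intro k
  induction k with
  | zero => intro f front T ops w hT hk; omega
  | succ k ih =>
    intro f front T ops w hT hk halive hdead
    have hne : (pvF y T front ++ [w]).isEmpty = false := by simp
    have hstep := pvStepA_F x y T front w hT
    have hsucc : f + (k + 1) = (f + k) + 1 := by omega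
    rw [hsucc]
    rcases Nat.eq_zero_or_pos k with hk0 | hk1
    · subst hk0
      have hw : w - x < 1 := by
        have : w - x * ((0 : Nat) + 1 : Nat) < 1 := hdead
        simpa using this
      simp only [pvLoopA, hne, Bool.false_eq_true, if_false]
      rw [hstep, if_neg (by omega)]
      norm_num
    · have hw1 : (1 : Int) ≤ w - x := by
        have := halive 1 (by omega) (by omega)
        simpa using this
      simp only [pvLoopA, hne, Bool.false_eq_true, if_false]
      rw [hstep, if_pos hw1]
      have hcond1 : ∀ j : Nat, 1 ≤ j → j < k → 1 ≤ (w - x) - x * j := by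
        intro j h1 h2
        have := halive (j + 1) (by omega) (by omega)
        have hc : w - x * ((j : Int) + 1) = (w - x) - x * j := by ring
        push_cast at this
        omega
      have hcond2 : (w - x) - x * k < 1 := by
        have hc : w - x * (((k : Int)) + 1) = (w - x) - x * k := by ring
        push_cast at hdead
        omega
      have := ih f front (T + 1) (ops + 1) (w - x) (by omega) hk1 hcond1 hcond2
      rw [this]
      have e1 : T + 1 + (k : Int) = T + ((k : Nat) + 1 : Nat) := by push_cast; ring
      have e2 : ops + 1 + (k : Int) = ops + ((k : Nat) + 1 : Nat) := by push_cast; ring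
      rw [e1, e2]

theorem pvSteps_pos (x v : Int) : 1 ≤ pvSteps x v := le_max_left _ _

theorem pvSteps_alive (x v : Int) (hx : 1 ≤ x) :
    ∀ j : Nat, 1 ≤ (j : Int) → (j : Int) < pvSteps x v → 1 ≤ v - x * j := by
  intro j hj1 hjk
  unfold pvSteps at hjk
  rw [PySem.Int.floordiv_eq_ediv_of_pos (by omega)] at hjk
  rcases lt_max_iff.mp hjk with h | h
  · omega
  · have hle : (j : Int) ≤ (v - 1) / x := by omega
    have h1 : x * (j : Int) ≤ x * ((v - 1) / x) := mul_le_mul_of_nonneg_left hle (by omega)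
    have h2 := Int.ediv_add_emod (v - 1) x
    have h3 := Int.emod_nonneg (v - 1) (by omega : x ≠ 0)
    omega

theorem pvSteps_dead (x v : Int) (hx : 1 ≤ x) : v - x * pvSteps x v < 1 := by
  unfold pvSteps
  rw [PySem.Int.floordiv_eq_ediv_of_pos (by omega)]
  have h2 := Int.ediv_add_emod (v - 1) x
  have h3 := Int.emod_lt_of_pos (v - 1) (by omega : 0 < x)
  rcases max_cases 1 ((v - 1) / x + 1) with ⟨he, hc⟩ | ⟨he, hc⟩ <;> rw [he]
  · have hq : (v - 1) / x ≤ 0 := by omega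
    have hxq : x * ((v - 1) / x) ≤ x * 0 := mul_le_mul_of_nonneg_left hq (by omega)
    simp only [mul_zero] at hxq
    omega
  · have hc' : x * ((v - 1) / x + 1) = x * ((v - 1) / x) + x := by ring
    omega

theorem pvGo_ge (x y : Int) (hx : 1 ≤ x) : ∀ (r : List Int) (T : Int), T ≤ pvGo x y r T := by
  intro r
  induction r with
  | nil => intro T; simp [pvGo]
  | cons t r ih =>
    intro T
    simp only [pvGo]
    split
    · exact ih T
    · have h1 := pvSteps_pos x (t - y * T)
      have h2 := ih (T + pvSteps x (t - y * T))
      omega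

-- the main correspondence: A's fueled loop on the pvF-view computes B's pvGo
theorem pvMain (x y : Int) (hx : 1 ≤ x) : ∀ (r : List Int) (f : Nat) (T ops : Int),
    0 ≤ T → (pvGo x y r T - T).toNat ≤ f →
    pvLoopA x y f (pvF y T r.reverse) ops = ops + (pvGo x y r T - T) := by
  intro r
  induction r with
  | nil =>
    intro f T ops hT hf
    simp only [List.reverse_nil, pvGo]
    rw [show pvF y T [] = [] from rfl, pvLoopA_nil]
    omega
  | cons t r ih =>
    intro f T ops hT hf
    rw [List.reverse_cons, pvF_append, pvF_singleton, pvAlive_not_dead y T t hT]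
    by_cases hd : pvDead y T t
    · simp only [hd, Bool.not_true, Bool.false_eq_true, if_false, List.append_nil]
      have hgo : pvGo x y (t :: r) T = pvGo x y r T := by simp [pvGo, hd]
      rw [hgo] at hf ⊢
      exact ih f T ops hT hf
    · simp only [hd, Bool.not_false, if_true]
      set kI := pvSteps x (t - y * T) with hkI
      have hk1 : 1 ≤ kI := pvSteps_pos x (t - y * T)
      set k : Nat := kI.toNat with hkdef
      have hkk : (k : Int) = kI := by omega
      have hgo : pvGo x y (t :: r) T = pvGo x y r (T + kI) := by
        simp [pvGo, hd, ← hkI]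
      rw [hgo] at hf ⊢
      have hge : T + kI ≤ pvGo x y r (T + kI) := pvGo_ge x y hx r (T + kI)
      have hfk : k ≤ f := by omega
      have hsplit : f = (f - k) + k := by omega
      have halive : ∀ j : Nat, 1 ≤ j → j < k → 1 ≤ (t - y * T) - x * j := by
        intro j h1 h2
        exact pvSteps_alive x (t - y * T) hx j (by omega) (by omega)
      have hdead' : (t - y * T) - x * (k : Int) < 1 := by
        rw [hkk]; exact pvSteps_dead x (t - y * T) hx
      rw [hsplit]
      rw [pvPhase x y k (f - k) r.reverse T ops (t - y * T) hT (by omega) halive hdead']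
      rw [show T + (k : Int) = T + kI by omega]
      have := ih (f - k) (T + kI) (ops + (k : Int)) (by omega) (by omega)
      rw [this]
      omega

-- the port's fuel dominates the total number of operations
theorem pvFuel (x y : Int) (hx : 1 ≤ x) : ∀ (r : List Int) (p : Nat) (T : Int),
    0 ≤ T → T ≤ (p : Int) → (pvGo x y r T).toNat ≤ r.foldl (pvFuelStep y) p := by
  intro r
  induction r with
  | nil => intro p T hT hp; simp only [pvGo, List.foldl_nil]; omega
  | cons t r ih =>
    intro p T hT hp
    simp only [pvGo, List.foldl_cons]
    have hstep : (p : Int) + 1 + ((t + (y.natAbs : Int) * (p : Int)).toNat : Int)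
        = ((pvFuelStep y p t : Nat) : Int) := by
      unfold pvFuelStep; push_cast; ring
    by_cases hd : pvDead y T t
    · simp only [hd, if_true]
      exact ih (pvFuelStep y p t) T hT (by omega)
    · simp only [hd, Bool.false_eq_true, if_false]
      set kI := pvSteps x (t - y * T) with hkI
      have hk1 : 1 ≤ kI := pvSteps_pos x (t - y * T)
      have hbound : T + kI ≤ ((pvFuelStep y p t : Nat) : Int) := by
        set m : Int := ((t + (y.natAbs : Int) * (p : Int)).toNat : Int) with hm
        have hmge : t + (y.natAbs : Int) * (p : Int) ≤ m := Int.self_le_toNat _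
        have hyT : (-y) * T ≤ (y.natAbs : Int) * (p : Int) := by
          have h1 : -y ≤ (y.natAbs : Int) := by
            have := neg_le_abs y; rwa [Int.abs_eq_natAbs] at this
          exact mul_le_mul h1 hp hT (by positivity)
        have hkw : kI ≤ max 1 (t - y * T) := by
          unfold pvSteps at hkI
          rw [PySem.Int.floordiv_eq_ediv_of_pos (by omega)] at hkI
          set v : Int := t - y * T with hv
          have h2 := Int.ediv_add_emod (v - 1) x
          have h3 := Int.emod_lt_of_pos (v - 1) (by omega : 0 < x)
          have h4 := Int.emod_nonneg (v - 1) (by omega : x ≠ 0)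
          have hq1 : (v - 1) / x + 1 ≤ max 1 v := by
            rcases le_or_gt 1 v with hv1 | hv1
            · have := Int.ediv_le_self x (by omega : (0:Int) ≤ v - 1)
              exact le_trans (by omega) (le_max_right _ _)
            · have hq0 : (v - 1) / x ≤ 0 := by
                by_contra hq
                have hxx : x * 1 ≤ x * ((v - 1) / x) :=
                  mul_le_mul_of_nonneg_left (by omega) (by omega)
                omega
              exact le_trans (by omega) (le_max_left _ _)
          rw [hkI]
          exact max_le (le_max_left _ _) hq1
        have hmax : max 1 (t - y * T) ≤ 1 + m := by
          have : t - y * T = t + (-y) * T := by ring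
          omega
        rw [← hstep]
        omega
      have := ih (pvFuelStep y p t) (T + kI) (by omega) hbound
      omega

-- ===== VERDICT (by name: the statement is the Claim_ definition above) =====
theorem citadelGetMinOperations_spec : Claim_equal_citadelGetMinOperations := by
  intro l x y _ hpre
  unfold Spec_citadelGetMinOperations citadelGetMinOperations citadelGetMinOperations_alt
  have hx : (1 : Int) ≤ x := hpre
  set s := PySem.List.sorted l (fun t => t) false with hs
  have h0 : pvF y 0 s.reverse.reverse = s := by rw [List.reverse_reverse, pvF_zero]
  have hfuel : (pvGo x y s.reverse 0 - 0).toNat ≤ s.reverse.foldl (pvFuelStep y) 0 := by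
    simpa using pvFuel x y hx s.reverse 0 0 le_rfl (by simp)
  have hmain := pvMain x y hx s.reverse (s.reverse.foldl (pvFuelStep y) 0) 0 0 le_rfl hfuel
  rw [h0] at hmain
  simpa using hmain
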